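-- pv_equiv track=rewrite | github.com/w2ria/APP-ENCRIPTACION | services/cifrado_transposicion_serie.py | obtener_series
-- ===== SOURCE A (Python) =====
-- def es_primo(n):
--     if n < 2:
--         return False
--     for i in range(2, int(n ** 0.5) + 1):
--         if n % i == 0:
--             return False
--     return True
--
-- def obtener_series(longitud):
--     ms1_pos, ms2_pos, ms3_pos = [], [], []
--
--     for i in range(1, longitud + 1):
--         if es_primo(i):
--             ms1_pos.append(i)
--         elif i % 2 == 0:
--             ms2_pos.append(i)
--         else:
--             ms3_pos.append(i)
--
--     return ms1_pos, ms2_pos, ms3_pos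
-- ===== SOURCE B (Python) =====
-- def obtener_series(longitud):
--     # Staged passes instead of one classifying loop: collect the primes first
--     # (integer d*d <= i trial division, no float sqrt), then split the rest by
--     # parity using set membership against the collected primes.
--     def es_primo_b(i):
--         if i < 2:
--             return False
--         d = 2
--         while d * d <= i:
--             if i % d == 0:
--                 return False
--             d += 1
--         return True
--     nums = range(1, longitud + 1)
--     primos = [i for i in nums if es_primo_b(i)]
--     prim_set = set(primos)
--     pares = [i for i in nums if i not in prim_set and i % 2 == 0]
--     impares = [i for i in nums if i not in prim_set and i % 2 != 0]
--     return primos, pares, impares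
-- ===== Notes on version B (the rewrite author's own statement) =====
-- stated objective: alternative
-- what changed: Replaces A's single classifying loop with staged passes: collect the primes first with an integer while-loop trial division (d*d <= i, no float sqrt), then split the remaining numbers by parity using set membership against the collected primes.
import Mathlib
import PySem

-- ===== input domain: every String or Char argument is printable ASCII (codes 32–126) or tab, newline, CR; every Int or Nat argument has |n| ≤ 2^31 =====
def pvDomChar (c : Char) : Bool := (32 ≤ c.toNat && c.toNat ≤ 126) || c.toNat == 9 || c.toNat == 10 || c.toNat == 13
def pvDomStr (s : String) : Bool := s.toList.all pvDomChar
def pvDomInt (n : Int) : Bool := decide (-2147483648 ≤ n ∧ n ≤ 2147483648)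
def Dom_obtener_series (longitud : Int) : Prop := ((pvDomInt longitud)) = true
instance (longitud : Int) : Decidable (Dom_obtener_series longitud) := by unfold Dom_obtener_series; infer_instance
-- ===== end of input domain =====

-- B classifies 1..n in three staged filter passes (primes / even non-primes / odd non-primes)
-- with an integer d*d ≤ i trial-division test, instead of A's single loop with a float-sqrt
-- bound; objective: alternative (same asymptotic cost, different decomposition).

-- ===== PORT A =====
-- 'for i in range(2, int(n**0.5)+1): if n % i == 0: return False' with early return
def esPrimoLoop (n : Int) : List Int → Bool
  | [] => true
  | d :: ds => if PySem.Int.mod n d = 0 then false else esPrimoLoop n ds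

-- int(n ** 0.5): exact as Nat.sqrt on 0 ≤ n ≤ 2^31 (a double sqrt of an int in that range can
-- only round across an integer at perfect squares, where it is exact)
def es_primo (n : Int) : Bool :=
  if n < 2 then false
  else esPrimoLoop n (PySem.List.pyRange 2 ((Nat.sqrt n.toNat : Int) + 1) 1)

-- the loop body: one i classified into exactly one of the three accumulating lists
def stepA (acc : List Int × List Int × List Int) (i : Int) : List Int × List Int × List Int :=
  if es_primo i then (acc.1 ++ [i], acc.2.1, acc.2.2)
  else if PySem.Int.mod i 2 = 0 then (acc.1, acc.2.1 ++ [i], acc.2.2)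
  else (acc.1, acc.2.1, acc.2.2 ++ [i])

def obtener_series (longitud : Int) : List Int × List Int × List Int :=
  (PySem.List.pyRange 1 (longitud + 1) 1).foldl stepA ([], [], [])

-- ===== PORT B =====
-- 'while d * d <= i: if i % d == 0: return False; d += 1' — i, d are positive there, so Nat
-- arithmetic is exact for Python's int arithmetic
def sinDivisor (i d : Nat) : Bool :=
  if _h : d * d ≤ i then
    if i % d = 0 then false else sinDivisor i (d + 1)
  else true
termination_by i + 2 - d
decreasing_by
  rcases Nat.eq_zero_or_pos d with rfl | hd0
  · omega
  · have hd : d ≤ d * d := Nat.le_mul_of_pos_left d hd0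
    omega

def es_primo_b (i : Int) : Bool :=
  if i < 2 then false else sinDivisor i.toNat 2

def obtener_series_alt (longitud : Int) : List Int × List Int × List Int :=
  let nums := PySem.List.pyRange 1 (longitud + 1) 1
  let primos := nums.filter (fun i => es_primo_b i)
  let primSet : PySem.Set Int := PySem.Set.ofList primos
  (primos,
   nums.filter (fun i => !(PySem.Set.contains primSet i) && (PySem.Int.mod i 2 == 0)),
   nums.filter (fun i => !(PySem.Set.contains primSet i) && !(PySem.Int.mod i 2 == 0)))

-- ===== PRECONDITION & SPEC =====
def Spec_obtener_series (longitud : Int) (out : List Int × List Int × List Int) : Prop := out = obtener_series_alt longitud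
instance (longitud : Int) (out : List Int × List Int × List Int) : Decidable (Spec_obtener_series longitud out) := by unfold Spec_obtener_series; infer_instance

-- ===== CLAIM (what is proved, stated in full; the proofs are below) =====
def Claim_equal_obtener_series : Prop := ∀ (longitud : Int), Dom_obtener_series longitud → Spec_obtener_series longitud (obtener_series longitud)

-- ===== LEMMAS AND PROOFS =====

lemma esPrimoLoop_eq_true_iff (n : Int) (l : List Int) :
    esPrimoLoop n l = true ↔ ∀ d ∈ l, PySem.Int.mod n d ≠ 0 := by
  induction l with
  | nil => simp [esPrimoLoop]
  | cons d ds ih =>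
      simp only [esPrimoLoop]
      split_ifs with h <;> simp [h, ih]

-- A's test decides primality (for i ≥ 0)
lemma es_primo_eq (i : Int) (hi : 0 ≤ i) :
    es_primo i = (decide (2 ≤ i) && decide (Nat.Prime i.toNat)) := by
  by_cases h2 : i < 2
  · have : ¬ (2 ≤ i) := by omega
    simp [es_primo, h2, this]
  · push Not at h2
    have hm2 : 2 ≤ i.toNat := by omega
    have hcast : (i.toNat : Int) = i := Int.toNat_of_nonneg hi
    simp only [es_primo, if_neg (by omega : ¬ i < 2), decide_eq_true h2, Bool.true_and]
    rcases Bool.eq_false_or_eq_true (esPrimoLoop i (PySem.List.pyRange 2 ((Nat.sqrt i.toNat : Int) + 1) 1)) with hb | hb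
    · rw [hb]
      symm; rw [decide_eq_true_iff]
      rw [esPrimoLoop_eq_true_iff] at hb
      rw [Nat.prime_def_le_sqrt]
      refine ⟨hm2, fun m hm hmsqrt hmdvd => ?_⟩
      have hmem : (m : Int) ∈ PySem.List.pyRange 2 ((Nat.sqrt i.toNat : Int) + 1) 1 := by
        rw [PySem.List.mem_pyRange_one]
        constructor <;> [exact_mod_cast hm; exact_mod_cast (by omega : (m:Int) < (Nat.sqrt i.toNat : Int) + 1)]
      have := hb _ hmem
      rw [Ne, PySem.Int.mod_eq_zero_iff_dvd] at this
      exact this (by rw [← hcast]; exact_mod_cast hmdvd)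
    · rw [hb]
      symm; rw [decide_eq_false_iff_not]
      intro hp
      rw [Bool.eq_false_iff, Ne, esPrimoLoop_eq_true_iff] at hb
      push Not at hb
      obtain ⟨d, hdmem, hdmod⟩ := hb
      rw [PySem.List.mem_pyRange_one] at hdmem
      rw [PySem.Int.mod_eq_zero_iff_dvd] at hdmod
      have hd2 : 2 ≤ d.toNat := by omega
      have hdsqrt : d.toNat ≤ Nat.sqrt i.toNat := by omega
      have hdvd : d.toNat ∣ i.toNat := by
        have : (d.toNat : Int) ∣ (i.toNat : Int) := by
          rw [Int.toNat_of_nonneg (by omega : (0:Int) ≤ d), hcast]; exact hdmod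
        exact_mod_cast this
      exact (Nat.prime_def_le_sqrt.mp hp).2 d.toNat hd2 hdsqrt hdvd

-- B's while loop tests: no m ≥ d with m*m ≤ i divides i
lemma sinDivisor_eq_true_iff (i d : Nat) :
    sinDivisor i d = true ↔ ∀ m, d ≤ m → m * m ≤ i → ¬ m ∣ i := by
  fun_induction sinDivisor i d with
  | case1 d h hm =>
      refine iff_of_false (by simp) ?_
      push Not
      exact ⟨d, le_refl d, h, Nat.dvd_of_mod_eq_zero hm⟩
  | case2 d h hm ih =>
      rw [ih]
      constructor
      · intro hall m hdm hmi
        rcases Nat.lt_or_ge d m with hlt | hge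
        · exact hall m (by omega) hmi
        · intro hdvd
          have hmd : m = d := by omega
          subst hmd
          obtain ⟨c, rfl⟩ := hdvd
          exact hm (Nat.mul_mod_right m c)
      · intro hall m hdm hmi
        exact hall m (by omega) hmi
  | case3 d h =>
      simp only [true_iff]
      intro m hdm hmi hdvd
      have : d * d ≤ m * m := Nat.mul_le_mul hdm hdm
      omega

-- B's test decides primality (for i ≥ 0)
lemma es_primo_b_eq (i : Int) (hi : 0 ≤ i) :
    es_primo_b i = (decide (2 ≤ i) && decide (Nat.Prime i.toNat)) := by
  by_cases h2 : i < 2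
  · have : ¬ (2 ≤ i) := by omega
    simp [es_primo_b, h2, this]
  · push Not at h2
    have hm2 : 2 ≤ i.toNat := by omega
    simp only [es_primo_b, if_neg (by omega : ¬ i < 2), decide_eq_true h2, Bool.true_and]
    rcases Bool.eq_false_or_eq_true (sinDivisor i.toNat 2) with hb | hb
    · rw [hb]
      symm; rw [decide_eq_true_iff]
      rw [sinDivisor_eq_true_iff] at hb
      rw [Nat.prime_def_le_sqrt]
      exact ⟨hm2, fun m hm hmsqrt hmdvd =>
        hb m hm ((Nat.le_sqrt.mp hmsqrt)) hmdvd⟩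
    · rw [hb]
      symm; rw [decide_eq_false_iff_not]
      intro hp
      rw [Bool.eq_false_iff, Ne, sinDivisor_eq_true_iff] at hb
      push Not at hb
      obtain ⟨m, hm2', hmsq, hmdvd⟩ := hb
      exact (Nat.prime_def_le_sqrt.mp hp).2 m hm2' (Nat.le_sqrt.mpr hmsq) hmdvd

-- membership in the collected primes list decides B's test, for i in the scanned range
lemma contains_primes (nums : List Int) (i : Int) (hi : i ∈ nums) :
    PySem.Set.contains (PySem.Set.ofList (nums.filter (fun j => es_primo_b j))) i
      = es_primo_b i := by
  cases hb : es_primo_b i with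
  | true =>
      rw [PySem.Set.contains_iff, PySem.Set.mem_ofList, List.mem_filter]
      exact ⟨hi, hb⟩
  | false =>
      rw [Bool.eq_false_iff, Ne, PySem.Set.contains_iff, PySem.Set.mem_ofList, List.mem_filter]
      rintro ⟨-, hc⟩
      rw [hb] at hc
      exact Bool.false_ne_true hc

-- the two tests agree on nonnegative i
lemma tests_agree (i : Int) (hi : 0 ≤ i) : es_primo i = es_primo_b i := by
  rw [es_primo_eq i hi, es_primo_b_eq i hi]

-- A's fold from arbitrary accumulators = three filter passes appended
lemma foldA_filters (l : List Int) (a b c : List Int) :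
    l.foldl stepA (a, b, c)
      = (a ++ l.filter (fun i => es_primo i),
         b ++ l.filter (fun i => !es_primo i && (PySem.Int.mod i 2 == 0)),
         c ++ l.filter (fun i => !es_primo i && !(PySem.Int.mod i 2 == 0))) := by
  induction l generalizing a b c with
  | nil => simp
  | cons x xs ih =>
      simp only [List.foldl_cons, List.filter_cons, stepA]
      by_cases hp : es_primo x = true
      · rw [if_pos hp, ih, hp]
        simp
      · rw [Bool.not_eq_true] at hp
        rw [if_neg (by rw [hp]; simp), hp]
        by_cases he : PySem.Int.mod x 2 = 0
        · rw [if_pos he, ih]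
          have he2 : (2:Int) ∣ x := (PySem.Int.mod_eq_zero_iff_dvd x 2).mp he
          simp [he2]
        · have hb : (PySem.Int.mod x 2 == 0) = false := by simpa using he
          rw [if_neg he, ih]
          have he' : x % 2 ≠ 0 := by rwa [← PySem.Int.mod_eq_emod_of_pos (by omega : (0:Int) < 2)]
          simp
          omega

-- ===== VERDICT (by name: the statement is the Claim_ definition above) =====
theorem obtener_series_spec : Claim_equal_obtener_series := by
  intro longitud _
  unfold Spec_obtener_series obtener_series obtener_series_alt
  have hmem : ∀ i ∈ PySem.List.pyRange 1 (longitud + 1) 1, (0:Int) ≤ i := by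
    intro i hi
    rw [PySem.List.mem_pyRange_one] at hi
    omega
  rw [foldA_filters]
  simp only [List.nil_append]
  refine congrArg₂ Prod.mk ?_ (congrArg₂ Prod.mk ?_ ?_) <;>
    refine List.filter_congr (fun i hi => ?_) <;>
    rw [tests_agree i (hmem i hi)] <;>
    rw [contains_primes _ i hi]
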